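-- pv_equiv track=rewrite | github.com/UMEP-dev/SUEWS | src/supy/data_model/pydantic_model_inspector.py | is_path_in_forbidden_location
-- ===== SOURCE A (Python) =====
-- from typing import Dict, List
--
-- def get_forbidden_path_patterns() -> List[str]:
--     """
--     Get list of field path patterns that correspond to Pydantic classes with extra="forbid".
--
--     Based on analysis of SUEWS data model:
--     - sites[].properties -> SiteProperties class (extra="forbid")
--
--     Returns:
--         List of path patterns that forbid extra parameters
--     """
--     return [
--         'sites.properties',
--         'sites.0.properties',
--         'sites.1.properties',
--         'sites.2.properties',
--         # Pattern for any site index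
--     ]
--
-- def is_path_in_forbidden_location(field_path: str) -> bool:
--     """
--     Check if a field path corresponds to a location that forbids extra parameters.
--
--     Args:
--         field_path: Dot-separated field path (e.g., 'sites.0.properties.test')
--
--     Returns:
--         True if the field is in a location that forbids extra parameters
--     """
--     forbidden_patterns = get_forbidden_path_patterns()
--
--     # Check if path contains any forbidden patterns
--     for pattern in forbidden_patterns:
--         if pattern in field_path:
--             # Additional check: ensure it's actually in the properties section
--             # and not in a nested allowed section like stebbs
--             if 'properties' in field_path and 'sites' in field_path:
--                 # Make sure it's directly under properties, not in a nested section
--                 # that might allow extra parameters (like stebbs)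
--                 path_parts = field_path.split('.')
--
--                 try:
--                     properties_index = path_parts.index('properties')
--                     # If there's another level after properties, check if it's an allowed nested section
--                     if properties_index + 1 < len(path_parts):
--                         next_part = path_parts[properties_index + 1]
--                         # Known nested sections that allow extra parameters
--                         allowed_nested_sections = ['stebbs', 'lai', 'irrigation', 'snow']
--                         if next_part in allowed_nested_sections:
--                             return False  # This is in an allowed nested section
--
--                     return True  # This is directly in properties (forbidden)
--                 except ValueError:
--                     # No 'properties' in path, continue checking other patterns
--                     continue
--
--     return False
-- ===== SOURCE B (Python) =====
-- _PATTERNS = ('sites.properties', 'sites.0.properties',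
--              'sites.1.properties', 'sites.2.properties')
-- _ALLOWED_NESTED = ('stebbs', 'lai', 'irrigation', 'snow')
--
--
-- def is_path_in_forbidden_location(field_path: str) -> bool:
--     """Straight-line check: substring match, then one split and one look at
--     the part following 'properties'."""
--     if not any(pattern in field_path for pattern in _PATTERNS):
--         return False
--     parts = field_path.split('.')
--     if 'properties' not in parts:
--         return False
--     nxt = parts.index('properties') + 1
--     return nxt >= len(parts) or parts[nxt] not in _ALLOWED_NESTED
-- ===== Notes on version B (the rewrite author's own statement) =====
-- stated objective: simpler
-- what changed: Replaces A's per-pattern loop, which re-runs the same allow-list logic with try/except-continue inside every iteration, by one straight-line check: a single any() substring test, one split, one membership test, and one look at the next path component.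
import Mathlib
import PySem

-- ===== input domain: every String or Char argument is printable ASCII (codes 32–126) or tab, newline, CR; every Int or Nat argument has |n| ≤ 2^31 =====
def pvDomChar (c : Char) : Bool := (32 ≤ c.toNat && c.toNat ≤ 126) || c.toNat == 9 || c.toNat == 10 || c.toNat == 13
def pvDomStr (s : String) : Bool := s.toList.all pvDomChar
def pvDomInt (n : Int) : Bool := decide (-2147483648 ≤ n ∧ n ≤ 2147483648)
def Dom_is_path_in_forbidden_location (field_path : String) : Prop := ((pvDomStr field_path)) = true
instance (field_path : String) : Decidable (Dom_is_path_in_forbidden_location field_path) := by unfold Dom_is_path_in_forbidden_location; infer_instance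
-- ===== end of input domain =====

-- B replaces A's per-pattern loop (which repeats the same properties/allow-list logic with
-- try/except-continue in every iteration) by one straight-line check: a single substring test,
-- one split, one look at the part after 'properties'. Objective: simpler; same behaviour.

-- ===== PORT A =====
def get_forbidden_path_patterns : List String :=
  ["sites.properties", "sites.0.properties", "sites.1.properties", "sites.2.properties"]

-- the 'for pattern in forbidden_patterns' loop of A; 'continue' = recurse on the rest,
-- falling out of the loop = false
def is_path_in_forbidden_location_loop (field_path : String) : List String → Bool
  | [] => false
  | pattern :: rest =>
    if PySem.Str.isIn pattern field_path then
      if PySem.Str.isIn "properties" field_path && PySem.Str.isIn "sites" field_path then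
        let path_parts := (PySem.Str.split? field_path ".").getD []   -- sep "." ≠ "", split? is always some
        match PySem.List.index? path_parts "properties" with
        | some properties_index =>
          if properties_index + 1 < path_parts.length then
            let next_part := path_parts.getD (properties_index + 1) ""
            let allowed_nested_sections : List String := ["stebbs", "lai", "irrigation", "snow"]
            if allowed_nested_sections.contains next_part then false
            else true
          else true
        | none => is_path_in_forbidden_location_loop field_path rest   -- ValueError: continue
      else is_path_in_forbidden_location_loop field_path rest
    else is_path_in_forbidden_location_loop field_path rest

def is_path_in_forbidden_location (field_path : String) : Bool :=
  is_path_in_forbidden_location_loop field_path get_forbidden_path_patterns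

-- ===== PORT B =====
def pvPatterns : List String :=
  ["sites.properties", "sites.0.properties", "sites.1.properties", "sites.2.properties"]

def pvAllowedNested : List String := ["stebbs", "lai", "irrigation", "snow"]

def is_path_in_forbidden_location_alt (field_path : String) : Bool :=
  if ! pvPatterns.any (fun pattern => PySem.Str.isIn pattern field_path) then false
  else
    let parts := (PySem.Str.split? field_path ".").getD []   -- sep "." ≠ "", split? is always some
    match PySem.List.index? parts "properties" with
    | none => false                                           -- 'properties' not in parts
    | some i =>
      decide (parts.length ≤ i + 1) || ! pvAllowedNested.contains (parts.getD (i + 1) "")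

-- ===== PRECONDITION & SPEC =====
def Spec_is_path_in_forbidden_location (field_path : String) (out : Bool) : Prop := out = is_path_in_forbidden_location_alt field_path
instance (field_path : String) (out : Bool) : Decidable (Spec_is_path_in_forbidden_location field_path out) := by unfold Spec_is_path_in_forbidden_location; infer_instance

-- ===== CLAIM (what is proved, stated in full; the proofs are below) =====
def Claim_equal_is_path_in_forbidden_location : Prop := ∀ (field_path : String), Dom_is_path_in_forbidden_location field_path → Spec_is_path_in_forbidden_location field_path (is_path_in_forbidden_location field_path)

-- ===== LEMMAS AND PROOFS =====

-- the computation both programs perform once some pattern matched (proof abbreviation)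
def pvTail (fp : String) : Bool :=
  match PySem.List.index? ((PySem.Str.split? fp ".").getD []) "properties" with
  | none => false
  | some i =>
    decide ((((PySem.Str.split? fp ".").getD []) : List String).length ≤ i + 1)
      || ! pvAllowedNested.contains (((PySem.Str.split? fp ".").getD []).getD (i + 1) "")

-- substring containment is transitive ('sub in pat' and 'pat in s' give 'sub in s')
theorem pv_isIn_trans {sub pat s : String}
    (h1 : PySem.Str.isIn sub pat = true) (h2 : PySem.Str.isIn pat s = true) :
    PySem.Str.isIn sub s = true := by
  rw [PySem.Str.isIn_iff_infix] at *
  exact h1.trans h2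

-- every forbidden pattern contains both "properties" and "sites" as substrings, so a matched
-- pattern forces A's inner substring guard to be true
theorem pv_guard_of_pattern {pat fp : String} (hmem : pat ∈ get_forbidden_path_patterns)
    (h : PySem.Str.isIn pat fp = true) :
    (PySem.Str.isIn "properties" fp && PySem.Str.isIn "sites" fp) = true := by
  fin_cases hmem <;>
    simp only [Bool.and_eq_true] <;>
    exact ⟨pv_isIn_trans (by decide) h, pv_isIn_trans (by decide) h⟩

-- B unfolds to the same shape: any pattern matched, then pvTail
theorem pv_alt_eq (fp : String) :
    is_path_in_forbidden_location_alt fp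
    = (if pvPatterns.any (fun pattern => PySem.Str.isIn pattern fp) then pvTail fp else false) := by
  cases h : pvPatterns.any (fun pattern => PySem.Str.isIn pattern fp) <;>
    simp only [is_path_in_forbidden_location_alt, h, Bool.not_false, Bool.not_true,
      if_true] <;> rfl

-- A's inner if-chain equals B's boolean formula once 'properties' sits at index i
theorem pv_inner_eq (parts : List String) (i : Nat) :
    (if i + 1 < parts.length then
        if (["stebbs", "lai", "irrigation", "snow"] : List String).contains (parts.getD (i + 1) "")
        then false else true
      else true)
    = (decide (parts.length ≤ i + 1) || ! pvAllowedNested.contains (parts.getD (i + 1) "")) := by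
  by_cases h : i + 1 < parts.length
  · simp [h, Nat.not_le.mpr h, pvAllowedNested]
  · simp [h, Nat.not_lt.mp h]

-- A's loop, characterised: the first matching pattern settles the answer as pvTail does
-- (an index? = none iteration continues, and every later iteration does the same)
theorem pv_loop_eq (fp : String) (ps : List String)
    (hps : ∀ p ∈ ps, p ∈ get_forbidden_path_patterns) :
    is_path_in_forbidden_location_loop fp ps
    = (if ps.any (fun pattern => PySem.Str.isIn pattern fp) then pvTail fp else false) := by
  induction ps with
  | nil => rfl
  | cons p rest ih =>
    have hrest : ∀ q ∈ rest, q ∈ get_forbidden_path_patterns :=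
      fun q hq => hps q (List.mem_cons_of_mem p hq)
    rw [is_path_in_forbidden_location_loop]
    cases hp : PySem.Str.isIn p fp with
    | false =>
      rw [if_neg (by simp only [Bool.false_eq_true, not_false_eq_true]), ih hrest]
      simp only [List.any_cons, hp, Bool.false_or]
    | true =>
      have hguard := pv_guard_of_pattern (hps p (List.mem_cons_self ..)) hp
      rw [if_pos rfl, if_pos hguard]
      simp only [List.any_cons, hp, Bool.true_or, if_true]
      cases hidx : PySem.List.index? ((PySem.Str.split? fp ".").getD []) "properties" with
      | none =>
        have htail : pvTail fp = false := by rw [pvTail, hidx]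
        rw [ih hrest, htail]
        cases rest.any (fun pattern => PySem.Str.isIn pattern fp) <;> simp
      | some i =>
        have htail : pvTail fp
            = (decide ((((PySem.Str.split? fp ".").getD []) : List String).length ≤ i + 1)
              || ! pvAllowedNested.contains (((PySem.Str.split? fp ".").getD []).getD (i + 1) "")) := by
          rw [pvTail, hidx]
        rw [htail]
        exact pv_inner_eq _ i

-- ===== VERDICT (by name: the statement is the Claim_ definition above) =====
theorem is_path_in_forbidden_location_spec : Claim_equal_is_path_in_forbidden_location := by
  intro fp _
  show is_path_in_forbidden_location fp = is_path_in_forbidden_location_alt fp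
  rw [is_path_in_forbidden_location, pv_loop_eq fp _ (fun p hp => hp), pv_alt_eq]
  rfl
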